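-- pv_equiv track=rewrite | github.com/newsniper-org/qfhe | devutils/gen_ntt_params.py | format_rust_array
-- ===== SOURCE A (Python) =====
-- def format_rust_array(name, arr, type="u128"):
--     """
--     Formats a Python list into a Rust static array string.
--     """
--     content = f"pub const {name}: [{type}; {len(arr)}] = [\n"
--     for i, val in enumerate(arr):
--         content += f"    {val},"
--         if (i + 1) % 8 == 0:
--             content += "\n"
--     if not content.endswith("\n"):
--         content += "\n"
--     content += "];\n"
--     return content
-- ===== SOURCE B (Python) =====
-- def format_rust_array(name, arr, type="u128"):
--     header = f"pub const {name}: [{type}; {len(arr)}] = [\n"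
--     lines = []
--     i = 0
--     while i < len(arr):
--         lines.append(''.join(f"    {v}," for v in arr[i:i + 8]))
--         i += 8
--     body = "\n".join(lines)
--     if body:
--         body += "\n"
--     return header + body + "];\n"
-- ===== Notes on version B (the rewrite author's own statement) =====
-- stated objective: simpler
-- what changed: Replaces A's flat enumerate loop with a modulo-8 newline test and a final endswith fix-up by chunking the list into groups of 8, joining one line string per chunk with '\n', and appending a single conditional trailing newline.
import Mathlib
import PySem

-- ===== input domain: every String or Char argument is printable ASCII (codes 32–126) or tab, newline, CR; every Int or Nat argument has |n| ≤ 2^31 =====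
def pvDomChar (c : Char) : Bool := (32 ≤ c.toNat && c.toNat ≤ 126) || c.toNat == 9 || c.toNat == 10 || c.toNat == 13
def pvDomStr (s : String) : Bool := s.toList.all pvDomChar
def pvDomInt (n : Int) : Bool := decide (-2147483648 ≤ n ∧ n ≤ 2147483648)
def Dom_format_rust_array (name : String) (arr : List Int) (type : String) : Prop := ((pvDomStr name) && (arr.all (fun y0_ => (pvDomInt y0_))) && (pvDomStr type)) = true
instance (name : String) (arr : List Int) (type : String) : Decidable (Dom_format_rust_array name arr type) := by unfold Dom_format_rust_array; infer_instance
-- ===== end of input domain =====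

-- B replaces A's flat loop with a modulo-8 newline test by chunking the list into
-- groups of 8 and joining per-chunk line strings (objective: simpler decomposition).


-- ===== PORT A =====
-- the f-string header 'pub const {name}: [{type}; {len(arr)}] = [\n' (shared text, used verbatim by both ports)
def pvHeader (name : String) (arr : List Int) (type : String) : List Char :=
  "pub const ".toList ++ name.toList ++ ": [".toList ++ type.toList ++ "; ".toList
    ++ PySem.Int.toChars (arr.length : Int) ++ "] = [\n".toList

-- one loop iteration's appended text: f'    {val},' plus the newline when (i+1) % 8 == 0
def pvPiece (p : Int × Int) : List Char :=
  "    ".toList ++ PySem.Int.toChars p.2 ++ [','] ++ (if (p.1 + 1) % 8 == 0 then ['\n'] else [])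

def format_rust_array (name : String) (arr : List Int) (type : String) : String :=
  let content := (PySem.List.enumerate arr 0).foldl (fun c p => c ++ pvPiece p) (pvHeader name arr type)
  let content := if PySem.Chars.endswith content ['\n'] then content else content ++ ['\n']
  String.ofList (content ++ "];\n".toList)

-- ===== PORT B =====
-- ''.join(f"    {v}," for v in chunk)
def pvLineOf (chunk : List Int) : List Char :=
  (chunk.map (fun v => "    ".toList ++ PySem.Int.toChars v ++ [','])).flatten

-- the while loop: one line per slice arr[i:i+8], i stepping by 8
def pvAltLinesIdx (arr : List Int) (i : Nat) : List (List Char) :=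
  if i < arr.length then
    pvLineOf (PySem.List.slice arr (some (i : Int)) (some ((i : Int) + 8))) :: pvAltLinesIdx arr (i + 8)
  else []
termination_by arr.length - i

def format_rust_array_alt (name : String) (arr : List Int) (type : String) : String :=
  let body := List.intercalate ['\n'] (pvAltLinesIdx arr 0)
  let body := if body = [] then body else body ++ ['\n']
  String.ofList (pvHeader name arr type ++ body ++ "];\n".toList)

-- ===== PRECONDITION & SPEC =====
def Spec_format_rust_array (name : String) (arr : List Int) (type : String) (out : String) : Prop := out = format_rust_array_alt name arr type
instance (name : String) (arr : List Int) (type : String) (out : String) : Decidable (Spec_format_rust_array name arr type out) := by unfold Spec_format_rust_array; infer_instance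

-- ===== CLAIM (what is proved, stated in full; the proofs are below) =====
def Claim_equal_format_rust_array : Prop := ∀ (name : String) (arr : List Int) (type : String), Dom_format_rust_array name arr type → Spec_format_rust_array name arr type (format_rust_array name arr type)

-- ===== LEMMAS AND PROOFS =====

-- chunk recursion on the list itself; pvAltLinesIdx arr i computes it on arr.drop i
def pvAltLines (rest : List Int) : List (List Char) :=
  match rest with
  | [] => []
  | x :: t => pvLineOf ((x :: t).take 8) :: pvAltLines ((x :: t).drop 8)
termination_by rest.length
decreasing_by simp

lemma pvAltLinesIdx_eq (arr : List Int) (i : Nat) :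
    pvAltLinesIdx arr i = pvAltLines (arr.drop i) := by
  rw [pvAltLinesIdx]
  by_cases h : i < arr.length
  · rw [if_pos h]
    have hd : arr.drop i ≠ [] := by
      rw [Ne, List.drop_eq_nil_iff]; omega
    obtain ⟨x, t, hxt⟩ := List.exists_cons_of_ne_nil hd
    rw [hxt, pvAltLines, ← hxt]
    have hslice : PySem.List.slice arr (some (i : Int)) (some ((i : Int) + 8))
        = (arr.drop i).take 8 := by
      rw [show ((i : Int) + 8) = ((i : Int) + ((8 : Nat) : Int)) by norm_num,
        PySem.List.slice_natCast_add]
    have hdd : (arr.drop i).drop 8 = arr.drop (i + 8) := by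
      rw [List.drop_drop]
    rw [hslice, hdd, pvAltLinesIdx_eq arr (i + 8)]
  · rw [if_neg h]
    have : arr.drop i = [] := by rw [List.drop_eq_nil_iff]; omega
    rw [this, pvAltLines]
  termination_by arr.length - i

lemma pv_getLast?_append_right {α : Type} (l₁ l₂ : List α) (h : l₂ ≠ []) :
    (l₁ ++ l₂).getLast? = l₂.getLast? := by
  rw [List.getLast?_append]
  cases hl : l₂.getLast? with
  | none => exact absurd (List.getLast?_eq_none_iff.mp hl) h
  | some a => rfl

lemma pvLineOf_getLast? (c : List Int) (h : c ≠ []) : (pvLineOf c).getLast? = some ',' := by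
  induction c with
  | nil => simp at h
  | cons v t ih =>
    cases t with
    | nil =>
      show (("    ".toList ++ PySem.Int.toChars v ++ [',']) ++ []).getLast? = some ','
      rw [List.append_nil, List.getLast?_concat]
    | cons w u =>
      have hrec := ih (by simp)
      show (("    ".toList ++ PySem.Int.toChars v ++ [',']) ++ pvLineOf (w :: u)).getLast? = some ','
      rw [List.getLast?_append, hrec]
      rfl

lemma pvLineOf_ne_nil (c : List Int) (h : c ≠ []) : pvLineOf c ≠ [] := by
  intro hn
  have := pvLineOf_getLast? c h
  rw [hn] at this; simp at this

-- A's appended text over one chunk of ≤ 8 values starting with (s % 8).toNat slots of the current line used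
lemma pvChunk (c : List Int) (s : Int) (hs : 0 ≤ s)
    (hlen : c.length + (s % 8).toNat ≤ 8) :
    (PySem.List.enumerate c s).flatMap pvPiece
      = pvLineOf c ++ (if c.length + (s % 8).toNat = 8 then ['\n'] else []) := by
  induction c generalizing s with
  | nil =>
    have h1 : (0:Int) ≤ s % 8 := Int.emod_nonneg s (by norm_num)
    have h2 : s % 8 < 8 := Int.emod_lt_of_pos s (by norm_num)
    have : (s % 8).toNat ≠ 8 := by omega
    simp [PySem.List.enumerate, pvLineOf, this]
  | cons v t ih =>
    have h1 : (0:Int) ≤ s % 8 := Int.emod_nonneg s (by norm_num)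
    have h2 : s % 8 < 8 := Int.emod_lt_of_pos s (by norm_num)
    rw [PySem.List.enumerate_cons]
    by_cases hz : (s + 1) % 8 = 0
    · -- end of an 8-group: s % 8 = 7, so t must be empty
      have h7 : s % 8 = 7 := by omega
      have ht : t = [] := by
        cases t with
        | nil => rfl
        | cons _ _ => exfalso; simp at hlen; omega
      subst ht
      simp [pvPiece, pvLineOf, PySem.List.enumerate, hz, h7]
    · have ihh := ih (s + 1) (by omega) (by simp at hlen ⊢; omega)
      have hiff : (t.length + ((s + 1) % 8).toNat = 8) ↔ ((v :: t).length + (s % 8).toNat = 8) := by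
        simp; omega
      rw [List.flatMap_cons, ihh, if_congr hiff rfl rfl]
      simp [pvPiece, pvLineOf, hz]

-- main invariant, chunk by chunk: A's appended text vs B's '\n'-joined lines, plus A's last character
lemma pvMain (arr : List Int) (s : Int) (hs : 0 ≤ s) (hmod : s % 8 = 0) (hne : arr ≠ []) :
    (PySem.List.enumerate arr s).flatMap pvPiece
        = List.intercalate ['\n'] (pvAltLines arr)
          ++ (if arr.length % 8 = 0 then ['\n'] else [])
      ∧ ((PySem.List.enumerate arr s).flatMap pvPiece).getLast?
          = some (if arr.length % 8 = 0 then '\n' else ',') := by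
  by_cases hsmall : arr.length ≤ 8
  · -- single chunk
    have htake : arr.take 8 = arr := List.take_of_length_le hsmall
    have hdrop : arr.drop 8 = [] := by rw [List.drop_eq_nil_iff]; omega
    have hchunk := pvChunk arr s hs (by omega)
    simp only [hmod, Int.toNat_zero, Nat.add_zero] at hchunk
    obtain ⟨x, t, rfl⟩ := List.exists_cons_of_ne_nil hne
    rw [hchunk, pvAltLines, htake, hdrop, pvAltLines]
    by_cases h8 : (x :: t).length = 8
    · have h8' : (x :: t).length % 8 = 0 := by omega
      rw [if_pos h8, if_pos h8']
      constructor
      · simp [List.intercalate]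
      · rw [if_pos h8', List.getLast?_concat]
    · have hlen0 : (x :: t).length ≠ 0 := by simp
      have h8' : (x :: t).length % 8 ≠ 0 := by omega
      simp only [if_neg h8, if_neg h8', List.append_nil]
      constructor
      · simp [List.intercalate]
      · exact pvLineOf_getLast? _ (by simp)
  · -- arr = chunk of 8 ++ rest, rest ≠ []
    have hsplit : arr = arr.take 8 ++ arr.drop 8 := (List.take_append_drop 8 arr).symm
    have hrne : arr.drop 8 ≠ [] := by rw [Ne, List.drop_eq_nil_iff]; omega
    have htl : (arr.take 8).length = 8 := by rw [List.length_take]; omega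
    have ih := pvMain (arr.drop 8) (s + 8) (by omega) (by omega) hrne
    have hchunk := pvChunk (arr.take 8) s hs (by omega)
    simp only [hmod, Int.toNat_zero, Nat.add_zero, htl] at hchunk
    have henum : (PySem.List.enumerate arr s).flatMap pvPiece
        = pvLineOf (arr.take 8) ++ ['\n'] ++ (PySem.List.enumerate (arr.drop 8) (s + 8)).flatMap pvPiece := by
      conv_lhs => rw [hsplit]
      rw [PySem.List.enumerate_append, List.flatMap_append, hchunk, htl]
      simp
    obtain ⟨x, t, hxt⟩ := List.exists_cons_of_ne_nil hne
    have halt : pvAltLines arr = pvLineOf (arr.take 8) :: pvAltLines (arr.drop 8) := by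
      rw [hxt, pvAltLines, ← hxt]
    have hrestne : pvAltLines (arr.drop 8) ≠ [] := by
      obtain ⟨y, u, hyu⟩ := List.exists_cons_of_ne_nil hrne
      rw [hyu, pvAltLines]; simp
    obtain ⟨l0, ls, hls⟩ := List.exists_cons_of_ne_nil hrestne
    have hinter : List.intercalate ['\n'] (pvAltLines arr)
        = pvLineOf (arr.take 8) ++ ['\n'] ++ List.intercalate ['\n'] (pvAltLines (arr.drop 8)) := by
      rw [halt, hls]
      simp [List.intercalate, List.intersperse]
    have hmodeq : arr.length % 8 = (arr.drop 8).length % 8 := by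
      rw [List.length_drop]; omega
    have hEne : ((PySem.List.enumerate (arr.drop 8) (s + 8)).flatMap pvPiece) ≠ [] := by
      intro hn; rw [hn] at ih; simp at ih
    constructor
    · rw [henum, hinter, ih.1, hmodeq]
      simp
    · rw [henum, hmodeq, List.append_assoc,
        pv_getLast?_append_right _ _ (by simp),
        pv_getLast?_append_right _ _ hEne, ih.2]
  termination_by arr.length
  decreasing_by simp; omega

lemma pvHeader_getLast? (name : String) (arr : List Int) (type : String) :
    (pvHeader name arr type).getLast? = some '\n' := by
  unfold pvHeader
  rw [List.getLast?_append]
  rfl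

lemma pvEndswith_iff_getLast? (l : List Char) :
    PySem.Chars.endswith l ['\n'] = true ↔ l.getLast? = some '\n' := by
  rw [PySem.Chars.endswith_iff]
  constructor
  · rintro ⟨t, rfl⟩
    rw [List.getLast?_append]; rfl
  · intro h
    have hne : l ≠ [] := by intro hn; rw [hn] at h; simp at h
    refine ⟨l.dropLast, ?_⟩
    have hl := List.getLast?_eq_some_getLast hne ▸ h
    conv_rhs => rw [← List.dropLast_append_getLast hne]
    congr 1
    simp only [List.getLast?_eq_some_getLast hne, Option.some_inj] at h
    rw [h]

lemma pvBody_ne_nil (arr : List Int) (hne : arr ≠ []) :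
    List.intercalate ['\n'] (pvAltLines arr) ≠ [] := by
  obtain ⟨x, t, rfl⟩ := List.exists_cons_of_ne_nil hne
  rw [pvAltLines]
  have hl := pvLineOf_ne_nil ((x :: t).take 8) (by simp)
  cases hrest : pvAltLines ((x :: t).drop 8) with
  | nil => simpa [List.intercalate]
  | cons a l =>
    simp only [List.intercalate, List.intersperse]
    intro hc
    exact hl (List.append_eq_nil_iff.mp hc).1

-- ===== VERDICT (by name: the statement is the Claim_ definition above) =====
theorem format_rust_array_spec : Claim_equal_format_rust_array := by
  intro name arr type _
  unfold Spec_format_rust_array format_rust_array format_rust_array_alt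
  dsimp only
  rw [PySem.List.foldl_append_eq_flatMap, pvAltLinesIdx_eq, List.drop_zero]
  by_cases hne : arr = []
  · subst hne
    simp [PySem.List.enumerate, pvAltLines, List.intercalate,
      pvEndswith_iff_getLast?, pvHeader_getLast? name [] type]
  · have ⟨h1, h2⟩ := pvMain arr 0 le_rfl (by decide) hne
    have hEne : ((PySem.List.enumerate arr 0).flatMap pvPiece) ≠ [] := by
      intro hn; rw [hn] at h2; simp at h2
    have hbody := pvBody_ne_nil arr hne
    have hlast : (pvHeader name arr type ++ (PySem.List.enumerate arr 0).flatMap pvPiece).getLast?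
        = some (if arr.length % 8 = 0 then '\n' else ',') := by
      rw [List.getLast?_append, h2]; rfl
    by_cases h8 : arr.length % 8 = 0
    · rw [if_pos h8] at h1
      rw [h1]
      have hes2 : PySem.Chars.endswith
          (pvHeader name arr type ++ (List.intercalate ['\n'] (pvAltLines arr) ++ ['\n'])) ['\n'] = true := by
        rw [pvEndswith_iff_getLast?, ← List.append_assoc, List.getLast?_concat]
      rw [if_pos hes2, if_neg hbody]
    · rw [if_neg h8, List.append_nil] at h1
      rw [h1]
      have hes2 : ¬ (PySem.Chars.endswith
          (pvHeader name arr type ++ List.intercalate ['\n'] (pvAltLines arr)) ['\n'] = true) := by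
        rw [pvEndswith_iff_getLast?, pv_getLast?_append_right _ _ hbody, ← h1, h2, if_neg h8]
        simp
      rw [if_neg hes2, if_neg hbody]
      congr 1
      simp [List.append_assoc]
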